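-- pv_equiv track=rewrite | github.com/TheSaminator/PhasmaDB | server/dbfuncs.py | get_sole_key
-- ===== SOURCE A (Python) =====
-- from typing import Any, NamedTuple, TypeVar, Optional, Union, Literal, Dict, List
--
-- def get_sole_key(d: Dict) -> Optional[str]:
-- 	sole_key = None
-- 	for key in d.keys():
-- 		if not sole_key:
-- 			sole_key = key
-- 		else:
-- 			return None
--
-- 	return sole_key
-- ===== SOURCE B (Python) =====
-- def get_sole_key(d):
-- 	if len(d) == 1:
-- 		return next(iter(d))
-- 	return None
-- ===== Notes on version B (the rewrite author's own statement) =====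
-- stated objective: simpler
-- what changed: Replaces the accumulating early-return loop with a direct size check: if the dict has exactly one key return it, else None.
-- intended difference: On dicts with exactly two keys whose first key is the empty string, A returns the second key (its 'not sole_key' truthiness test treats an empty-string key as unset and overwrites it) while B returns None, the intended answer since such a dict does not have a sole key. — e.g. on get_sole_key([("", 0), ("a", 1)]): A returns some "a", B returns none
import Mathlib
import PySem

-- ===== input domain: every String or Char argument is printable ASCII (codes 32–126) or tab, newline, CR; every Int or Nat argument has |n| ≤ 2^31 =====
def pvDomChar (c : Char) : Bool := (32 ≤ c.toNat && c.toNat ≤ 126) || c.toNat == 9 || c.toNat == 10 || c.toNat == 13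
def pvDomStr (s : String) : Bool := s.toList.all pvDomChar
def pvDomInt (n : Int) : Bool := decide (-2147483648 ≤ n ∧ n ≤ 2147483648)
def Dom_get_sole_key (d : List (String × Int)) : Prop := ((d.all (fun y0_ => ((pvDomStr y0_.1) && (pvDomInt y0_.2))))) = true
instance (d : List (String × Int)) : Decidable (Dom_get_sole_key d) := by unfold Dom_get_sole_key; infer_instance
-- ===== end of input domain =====

-- B replaces A's accumulating early-return loop with a direct size check (objective: simpler).

-- ===== PORT A =====
-- 'not sole_key': sole_key is falsy when it is None or the empty string
def pvFalsy (sole : Option String) : Bool :=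
  match sole with
  | none => true
  | some s => s == ""

-- the for-loop of A with early return: state is sole_key
def getSoleKeyLoop (sole : Option String) (ks : List String) : Option String :=
  match ks with
  | [] => sole
  | k :: rest => if pvFalsy sole then getSoleKeyLoop (some k) rest else none

def get_sole_key (d : List (String × Int)) : Option String :=
  getSoleKeyLoop none (PySem.Dict.ofList d).keys

-- ===== PORT B =====
-- if len(d) == 1: return next(iter(d)); return None
def get_sole_key_alt (d : List (String × Int)) : Option String :=
  if (PySem.Dict.ofList d).size = 1 then (PySem.Dict.ofList d).keys.head? else none

-- ===== PRECONDITION & SPEC =====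
-- On dicts with exactly two keys whose first key is the empty string, A returns the second
-- key (its 'not sole_key' truthiness test treats an empty-string key as unset and overwrites
-- it) while B returns none, the intended answer since such a dict does not have a sole key.
def D_get_sole_key (d : List (String × Int)) : Prop :=
  (PySem.List.dedup (d.map Prod.fst)).length = 2 ∧
  (PySem.List.dedup (d.map Prod.fst)).head? = some ""
instance (d : List (String × Int)) : Decidable (D_get_sole_key d) := by unfold D_get_sole_key; infer_instance

def Spec_get_sole_key (d : List (String × Int)) (out : Option String) : Prop :=
  ¬ D_get_sole_key d → out = get_sole_key_alt d
instance (d : List (String × Int)) (out : Option String) : Decidable (Spec_get_sole_key d out) := by unfold Spec_get_sole_key; infer_instance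

def pvDiffWitness_get_sole_key : (List (String × Int)) := [("", 0), ("a", 1)]
def pvDiffWitnessOut_get_sole_key : (Option String) × (Option String) := (some "a", none)

-- ===== CLAIM (what is proved, stated in full; the proofs are below) =====
def Claim_unchanged_get_sole_key : Prop := ∀ (d : List (String × Int)), Dom_get_sole_key d → Spec_get_sole_key d (get_sole_key d)
def Claim_changed_get_sole_key : Prop := Dom_get_sole_key (pvDiffWitness_get_sole_key) ∧ D_get_sole_key (pvDiffWitness_get_sole_key) ∧ get_sole_key (pvDiffWitness_get_sole_key) = pvDiffWitnessOut_get_sole_key.1 ∧ get_sole_key_alt (pvDiffWitness_get_sole_key) = pvDiffWitnessOut_get_sole_key.2 ∧ pvDiffWitnessOut_get_sole_key.1 ≠ pvDiffWitnessOut_get_sole_key.2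
def Claim_exact_get_sole_key : Prop := ∀ (d : List (String × Int)), Dom_get_sole_key d → D_get_sole_key d → get_sole_key d ≠ get_sole_key_alt d

-- ===== LEMMAS AND PROOFS =====

theorem keys_ofList_eq_dedup (d : List (String × Int)) :
    (PySem.Dict.ofList d).keys = PySem.List.dedup (d.map Prod.fst) := by
  have h : PySem.Dict.ofList d = d.foldl (fun dd p => dd.insert p.1 p.2) PySem.Dict.empty := rfl
  rw [h, PySem.Dict.keys_foldl_insert_key, PySem.Dict.keys_empty, PySem.Set.update_nil_left,
      PySem.List.dedup_eq_ofList]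

theorem loop_some_ne (k : String) (ks : List String) (h : k ≠ "") :
    getSoleKeyLoop (some k) ks = if ks = [] then some k else none := by
  cases ks <;> simp [getSoleKeyLoop, pvFalsy, h]

-- A's loop agrees with the size check on any duplicate-free key list outside the change region
theorem loop_eq_alt (ks : List String) (hnd : ks.Nodup)
    (hD : ¬ (ks.length = 2 ∧ ks.head? = some "")) :
    getSoleKeyLoop none ks = if ks.length = 1 then ks.head? else none := by
  match ks with
  | [] => simp [getSoleKeyLoop]
  | [k] => simp [getSoleKeyLoop, pvFalsy]
  | k :: r :: rs =>
    by_cases hk : k = ""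
    · subst hk
      have hrs : rs ≠ [] := by
        intro h; subst h; exact hD ⟨rfl, rfl⟩
      have hr : r ≠ "" := by
        have := hnd
        simp [List.nodup_cons] at this
        intro h; exact this.1.1 h
      have h1 : getSoleKeyLoop none ("" :: r :: rs) = getSoleKeyLoop (some r) rs := by
        simp [getSoleKeyLoop, pvFalsy]
      rw [h1, loop_some_ne r rs hr]
      simp [hrs]
    · have h1 : getSoleKeyLoop none (k :: r :: rs) = getSoleKeyLoop (some k) (r :: rs) := by
        simp [getSoleKeyLoop, pvFalsy]
      rw [h1, loop_some_ne k (r :: rs) hk]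
      simp

theorem size_eq_keys_length (d : List (String × Int)) :
    (PySem.Dict.ofList d).size = (PySem.Dict.ofList d).keys.length := by
  simp [PySem.Dict.size, PySem.Dict.keys]

-- ===== VERDICT (by name: the statement is the Claim_ definition above) =====
theorem get_sole_key_spec : Claim_unchanged_get_sole_key := by
  intro d _ hD
  unfold D_get_sole_key at hD
  unfold get_sole_key get_sole_key_alt
  rw [← keys_ofList_eq_dedup d] at hD
  rw [size_eq_keys_length]
  exact loop_eq_alt _ (PySem.Dict.nodup_keys_ofList d) hD

theorem get_sole_key_changed : Claim_changed_get_sole_key := by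
  unfold Claim_changed_get_sole_key; decide

theorem get_sole_key_tight : Claim_exact_get_sole_key := by
  intro d _ hD
  unfold D_get_sole_key at hD
  rw [← keys_ofList_eq_dedup d] at hD
  unfold get_sole_key get_sole_key_alt
  rw [size_eq_keys_length]
  obtain ⟨hlen, hhd⟩ := hD
  match hks : (PySem.Dict.ofList d).keys, hlen, hhd with
  | k :: [r], _, hhd =>
    have hk : k = "" := by simpa using hhd
    subst hk
    simp [getSoleKeyLoop, pvFalsy]
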